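-- pv_equiv track=rewrite | github.com/davitacols/recall | backend/apps/knowledge/ai_intelligence.py | _select_relevant_interventions
-- ===== SOURCE A (Python) =====
-- def _query_mentions(query, *terms):
--     text = str(query or '').strip().lower()
--     if not text:
--         return False
--     cleaned_tokens = set(''.join(ch for ch in token if ch.isalnum()) for token in text.replace('-', ' ').split())
--     cleaned_tokens.discard('')
--     for term in terms:
--         normalized = str(term or '').strip().lower()
--         if not normalized:
--             continue
--         compact = ''.join(ch for ch in normalized if ch.isalnum())
--         if normalized in text or compact in cleaned_tokens:
--             return True
--     return False
--
-- def _select_relevant_interventions(query, recommended_interventions, limit=3):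
--     interventions = list(recommended_interventions or [])
--     if not interventions:
--         return []
--
--     preferred_kinds = []
--     if _query_mentions(query, 'task', 'tasks', 'reassign', 'assign', 'owner', 'assignee', 'ownership'):
--         preferred_kinds.append('task_ownership')
--     if _query_mentions(query, 'blocker', 'blockers', 'blocked', 'unblock'):
--         preferred_kinds.append('blocker_escalation')
--     if _query_mentions(query, 'decision', 'decisions', 'approval', 'resolve'):
--         preferred_kinds.append('decision_resolution')
--
--     for kind in preferred_kinds:
--         matching = [item for item in interventions if item.get('kind') == kind]
--         if matching:
--             return matching[:limit]
--     return interventions[:limit]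
-- ===== SOURCE B (Python) =====
-- def _query_mentions(query, *terms):
--     text = str(query or '').strip().lower()
--     if not text:
--         return False
--     cleaned_tokens = set(''.join(ch for ch in token if ch.isalnum()) for token in text.replace('-', ' ').split())
--     cleaned_tokens.discard('')
--     for term in terms:
--         normalized = str(term or '').strip().lower()
--         if not normalized:
--             continue
--         compact = ''.join(ch for ch in normalized if ch.isalnum())
--         if normalized in text or compact in cleaned_tokens:
--             return True
--     return False
--
-- _KIND_TERMS = [
--     ('task_ownership', ('task', 'tasks', 'reassign', 'assign', 'owner', 'assignee', 'ownership')),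
--     ('blocker_escalation', ('blocker', 'blockers', 'blocked', 'unblock')),
--     ('decision_resolution', ('decision', 'decisions', 'approval', 'resolve')),
-- ]
--
-- def _select_relevant_interventions(query, recommended_interventions, limit=3):
--     interventions = list(recommended_interventions or [])
--     groups = {}
--     for item in interventions:
--         groups.setdefault(item.get('kind'), []).append(item)
--     for kind, terms in _KIND_TERMS:
--         if _query_mentions(query, *terms) and groups.get(kind):
--             return groups[kind][:limit]
--     return interventions[:limit]
-- ===== Notes on version B (the rewrite author's own statement) =====
-- stated objective: simpler
-- what changed: Replaces the conditionally built preferred_kinds list plus a full filter scan of interventions per preferred kind with a single order-preserving grouping pass into a dict keyed by item.get('kind'), then one loop over a static kind/terms table doing O(1) group lookups; the empty-input special case disappears.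
import Mathlib
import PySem

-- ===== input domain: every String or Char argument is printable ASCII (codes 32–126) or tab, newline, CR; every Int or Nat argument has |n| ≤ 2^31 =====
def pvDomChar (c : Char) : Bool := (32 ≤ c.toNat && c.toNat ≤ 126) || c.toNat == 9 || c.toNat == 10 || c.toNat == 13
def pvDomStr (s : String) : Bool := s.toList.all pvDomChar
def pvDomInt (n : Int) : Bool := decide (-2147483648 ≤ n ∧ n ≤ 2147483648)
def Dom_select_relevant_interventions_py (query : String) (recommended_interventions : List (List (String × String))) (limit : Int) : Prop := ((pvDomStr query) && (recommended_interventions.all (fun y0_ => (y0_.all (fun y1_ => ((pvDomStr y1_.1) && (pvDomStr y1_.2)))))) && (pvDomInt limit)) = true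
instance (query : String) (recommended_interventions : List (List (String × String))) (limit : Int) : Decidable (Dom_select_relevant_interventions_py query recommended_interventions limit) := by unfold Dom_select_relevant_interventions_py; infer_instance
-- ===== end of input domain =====

-- B replaces A's per-kind repeated filter scans with one order-preserving grouping pass into a dict
-- plus a loop over a static kind/terms table (objective: simpler).


-- ===== PORT A =====
-- shared helper: transliteration of _query_mentions (identical in Source A and Source B)
def pvQMLoop (text : String) (cleaned : PySem.Set String) : List String → Bool
  | [] => false
  | term :: rest =>
    let normalized := PySem.Str.lower (PySem.Str.strip term)
    if normalized == "" then pvQMLoop text cleaned rest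
    else
      let compact := String.ofList (normalized.toList.filter PySem.Chars.isalnum)
      if PySem.Str.isIn normalized text || PySem.Set.contains cleaned compact then true
      else pvQMLoop text cleaned rest

def pvQueryMentions (query : String) (terms : List String) : Bool :=
  let text := PySem.Str.lower (PySem.Str.strip query)
  if text == "" then false
  else
    let cleaned := PySem.Set.discard
      (PySem.Set.ofList ((PySem.Str.split₀ (PySem.Str.replace text "-" " ")).map
        (fun token => String.ofList (token.toList.filter PySem.Chars.isalnum)))) ""
    pvQMLoop text cleaned terms

-- A's for-loop over preferred_kinds with early return
def pvASelect (interventions : List (List (String × String))) (limit : Int) :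
    List String → List (List (String × String))
  | [] => PySem.List.slice interventions none (some limit)
  | kind :: rest =>
    let matching := interventions.filter (fun item => (PySem.Dict.mk item).get? "kind" == some kind)
    if matching.isEmpty then pvASelect interventions limit rest
    else PySem.List.slice matching none (some limit)

def select_relevant_interventions_py (query : String) (recommended_interventions : List (List (String × String))) (limit : Int) : List (List (String × String)) :=
  let interventions := recommended_interventions
  if interventions.isEmpty then []
  else
    let preferred_kinds : List String := []
    let preferred_kinds := if pvQueryMentions query ["task", "tasks", "reassign", "assign", "owner", "assignee", "ownership"] then preferred_kinds ++ ["task_ownership"] else preferred_kinds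
    let preferred_kinds := if pvQueryMentions query ["blocker", "blockers", "blocked", "unblock"] then preferred_kinds ++ ["blocker_escalation"] else preferred_kinds
    let preferred_kinds := if pvQueryMentions query ["decision", "decisions", "approval", "resolve"] then preferred_kinds ++ ["decision_resolution"] else preferred_kinds
    pvASelect interventions limit preferred_kinds

-- ===== PORT B =====
def pvKindTerms : List (String × List String) :=
  [("task_ownership", ["task", "tasks", "reassign", "assign", "owner", "assignee", "ownership"]),
   ("blocker_escalation", ["blocker", "blockers", "blocked", "unblock"]),
   ("decision_resolution", ["decision", "decisions", "approval", "resolve"])]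

-- B's for-loop over the static kind/terms table with early return
def pvBSelect (query : String) (groups : PySem.Dict (Option String) (List (List (String × String))))
    (interventions : List (List (String × String))) (limit : Int) :
    List (String × List String) → List (List (String × String))
  | [] => PySem.List.slice interventions none (some limit)
  | (kind, terms) :: rest =>
    let g := groups.getD (some kind) []
    if pvQueryMentions query terms && !g.isEmpty then PySem.List.slice g none (some limit)
    else pvBSelect query groups interventions limit rest

def select_relevant_interventions_py_alt (query : String) (recommended_interventions : List (List (String × String))) (limit : Int) : List (List (String × String)) :=
  let interventions := recommended_interventions
  let groups := interventions.foldl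
    (fun d item => PySem.Dict.modify d ((PySem.Dict.mk item).get? "kind") [] (fun v => v ++ [item]))
    PySem.Dict.empty
  pvBSelect query groups interventions limit pvKindTerms

-- ===== PRECONDITION & SPEC =====
def Spec_select_relevant_interventions_py (query : String) (recommended_interventions : List (List (String × String))) (limit : Int) (out : List (List (String × String))) : Prop := out = select_relevant_interventions_py_alt query recommended_interventions limit
instance (query : String) (recommended_interventions : List (List (String × String))) (limit : Int) (out : List (List (String × String))) : Decidable (Spec_select_relevant_interventions_py query recommended_interventions limit out) := by unfold Spec_select_relevant_interventions_py; infer_instance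

-- ===== CLAIM (what is proved, stated in full; the proofs are below) =====
def Claim_equal_select_relevant_interventions_py : Prop := ∀ (query : String) (recommended_interventions : List (List (String × String))) (limit : Int), Dom_select_relevant_interventions_py query recommended_interventions limit → Spec_select_relevant_interventions_py query recommended_interventions limit (select_relevant_interventions_py query recommended_interventions limit)

-- ===== LEMMAS AND PROOFS =====

-- the group built for key k is exactly A's filter of the input by that kind
theorem pv_groupD (xs : List (List (String × String))) (k : Option String) :
    (xs.foldl
      (fun d item => PySem.Dict.modify d ((PySem.Dict.mk item).get? "kind") [] (fun v => v ++ [item]))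
      PySem.Dict.empty).getD k []
    = xs.filter (fun item => (PySem.Dict.mk item).get? "kind" == k) := by
  rw [← List.foldl_map (f := fun item : List (String × String) => ((PySem.Dict.mk item).get? "kind", item))
      (g := fun d p => PySem.Dict.modify d p.1 [] (fun v => v ++ [p.2]))]
  rw [PySem.Dict.getD_foldl_modify_append]
  simp [PySem.Dict.getD_empty, List.filter_map, Function.comp_def]

theorem pv_ite_forall_not {α β : Type} (l : List α) (P : α → Prop) [DecidablePred P] (x y : β) :
    (if ∀ a ∈ l, ¬ P a then x else y) = if ∃ a ∈ l, P a then y else x := by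
  by_cases h : ∃ a ∈ l, P a
  · obtain ⟨a, ha, hp⟩ := h
    rw [if_neg (fun hall => hall a ha hp), if_pos ⟨a, ha, hp⟩]
  · rw [if_neg h, if_pos (fun a ha hp => h ⟨a, ha, hp⟩)]

theorem pv_slice_nil (a b : Option Int) : PySem.List.slice ([] : List (List (String × String))) a b = [] := by
  simp [PySem.List.slice]

-- ===== VERDICT (by name: the statement is the Claim_ definition above) =====
theorem select_relevant_interventions_py_spec : Claim_equal_select_relevant_interventions_py := by
  intro query ri limit _
  unfold Spec_select_relevant_interventions_py select_relevant_interventions_py select_relevant_interventions_py_alt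
  by_cases hri : ri = []
  · subst hri
    simp [pvBSelect, pvKindTerms, PySem.Dict.getD_empty, pv_slice_nil]
  · have hne : ri.isEmpty = false := by simpa [List.isEmpty_iff] using hri
    simp only [hne, pvKindTerms]
    cases h1 : pvQueryMentions query ["task", "tasks", "reassign", "assign", "owner", "assignee", "ownership"] <;>
    cases h2 : pvQueryMentions query ["blocker", "blockers", "blocked", "unblock"] <;>
    cases h3 : pvQueryMentions query ["decision", "decisions", "approval", "resolve"] <;>
      simp [pvASelect, pvBSelect, h1, h2, h3, pv_groupD, pv_ite_forall_not]
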